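-- pv_equiv track=rewrite | github.com/EduardAlex/UdaromKazlataiRyl | main.py | inttxt
-- ===== SOURCE A (Python) =====
-- def inttxt(txt):
--     a = ""
--     skip = False
--     b = {"y'": 'ý', 'a:': 'ä', 'u:': 'ü', 'a.': 'ą', 'e:': 'ë', 'i:': 'ï',
--         "t'": 'ť', "d'": 'ď', "s'": 'ś', "z'": 'ź', "h'": 'ħ', "c'": 'ć', "l'": 'ĺ', "n'": 'ń',
--         "g'": 'ģ', 'u<': 'ŭ', 'c<': 'č', 'z<': 'ž', 's<': 'š', 't;': "ts'", "a'": "à"}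
--     for i,j in enumerate(txt):
--         if skip:
--             skip = False
--             continue
--         try:
--             s = j + txt[i+1]
--             if s in b:
--                 a += b[s]
--                 skip = True
--             else:
--                 a += j
--         except:
--             a += j
--     return a
-- ===== SOURCE B (Python) =====
-- import re
--
-- def inttxt(txt):
--     b = {"y'": 'ý', 'a:': 'ä', 'u:': 'ü', 'a.': 'ą', 'e:': 'ë', 'i:': 'ï',
--         "t'": 'ť', "d'": 'ď', "s'": 'ś', "z'": 'ź', "h'": 'ħ', "c'": 'ć', "l'": 'ĺ', "n'": 'ń',
--         "g'": 'ģ', 'u<': 'ŭ', 'c<': 'č', 'z<': 'ž', 's<': 'š', 't;': "ts'", "a'": "à"}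
--     pattern = '|'.join(map(re.escape, b))
--     return re.sub(pattern, lambda m: b[m.group(0)], txt)
-- ===== Notes on version B (the rewrite author's own statement) =====
-- stated objective: idiomatic
-- what changed: Replaces A's manual enumerate loop with skip flag, try/except on txt[i+1] and quadratic string += by a single re.sub over an alternation of the re.escape'd digraph keys with a callable replacement; the regex engine's leftmost non-overlapping scan performs the whole transliteration.
import Mathlib
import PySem

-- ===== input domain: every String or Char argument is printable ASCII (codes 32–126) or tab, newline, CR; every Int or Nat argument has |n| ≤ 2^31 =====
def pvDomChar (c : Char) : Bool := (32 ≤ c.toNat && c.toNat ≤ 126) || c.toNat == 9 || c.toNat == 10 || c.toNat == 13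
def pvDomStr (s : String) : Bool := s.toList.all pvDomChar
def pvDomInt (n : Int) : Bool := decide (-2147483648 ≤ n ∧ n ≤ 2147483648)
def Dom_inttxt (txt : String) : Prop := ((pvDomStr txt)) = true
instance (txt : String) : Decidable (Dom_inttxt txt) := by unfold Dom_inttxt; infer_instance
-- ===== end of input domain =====

-- B replaces A's manual enumerate/skip-flag/try-except scan by one re.sub over an alternation
-- of the escaped digraph keys with a callable replacement: idiomatic, no explicit loop.

-- the digraph table (the dict b, shared data of both ports)
def inttxtB : PySem.Dict String String := ⟨[("y'", "ý"), ("a:", "ä"), ("u:", "ü"),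
  ("a.", "ą"), ("e:", "ë"), ("i:", "ï"), ("t'", "ť"), ("d'", "ď"), ("s'", "ś"),
  ("z'", "ź"), ("h'", "ħ"), ("c'", "ć"), ("l'", "ĺ"), ("n'", "ń"), ("g'", "ģ"),
  ("u<", "ŭ"), ("c<", "č"), ("z<", "ž"), ("s<", "š"), ("t;", "ts'"), ("a'", "à")]⟩

-- ===== PORT A =====
-- loop body of A: state (a, skip); txt[i+1] via pyGet? (none = the IndexError the except eats)
def inttxtStep (cs : List Char) (st : List Char × Bool) (p : Int × Char) : List Char × Bool :=
  if st.2 then (st.1, false)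
  else
    match PySem.List.pyGet? cs (p.1 + 1) with
    | some c2 =>
      match PySem.Dict.get? inttxtB (String.ofList [p.2, c2]) with
      | some v => (st.1 ++ v.toList, true)
      | none => (st.1 ++ [p.2], false)
    | none => (st.1 ++ [p.2], false)

def inttxt (txt : String) : String :=
  String.ofList ((PySem.List.enumerate txt.toList).foldl (inttxtStep txt.toList) ([], false)).1

-- ===== PORT B =====
-- Hand port of re.sub for THIS pattern — an alternation of re.escape'd literal strings: the
-- engine scans left to right; at each position it tries the alternatives in pattern order
-- (= the keys in dict-insertion order, which is what '|'.join(map(re.escape, b)) produces;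
-- re.escape only makes each key match itself literally); on a match it emits repl(match) and
-- resumes after the matched text, otherwise it keeps the character and moves on. Exact for
-- this pattern on every string (all keys are nonempty).
def pyReSubLit (keys : List String) (repl : String → String) : List Char → List Char
  | [] => []
  | c :: rest =>
    match keys.find? (fun k => k.toList.isPrefixOf (c :: rest)) with
    | some k => (repl k).toList ++ pyReSubLit keys repl (rest.drop (k.toList.length - 1))
    | none => c :: pyReSubLit keys repl rest
termination_by cs => cs.length
decreasing_by
  · simp only [List.length_cons, List.length_drop]; omega
  · simp

-- the lambda m: b[m.group(0)]: the matched text is always a key of b, so b[k] hits; ported as getD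
def inttxt_alt (txt : String) : String :=
  String.ofList (pyReSubLit (PySem.Dict.keys inttxtB)
    (fun k => PySem.Dict.getD inttxtB k "") txt.toList)

-- ===== PRECONDITION & SPEC =====
def Spec_inttxt (txt : String) (out : String) : Prop := out = inttxt_alt txt
instance (txt : String) (out : String) : Decidable (Spec_inttxt txt out) := by unfold Spec_inttxt; infer_instance

-- ===== CLAIM (what is proved, stated in full; the proofs are below) =====
def Claim_equal_inttxt : Prop := ∀ (txt : String), Dom_inttxt txt → Spec_inttxt txt (inttxt txt)

-- ===== LEMMAS AND PROOFS =====

lemma inttxt_keys_len2 : ∀ e ∈ inttxtB.items, e.1.toList.length = 2 := by decide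

-- a 2-char key is never a prefix of a 1-char remainder
lemma len2_not_prefix_single (l : List Char) (h : l.length = 2) (c : Char) :
    l.isPrefixOf [c] = false := by
  match l, h with
  | [a, b], _ => simp [List.isPrefixOf]

lemma find?_single (c : Char) :
    (PySem.Dict.keys inttxtB).find? (fun k => k.toList.isPrefixOf [c]) = none := by
  apply List.find?_eq_none.mpr
  intro k hk
  simp only [PySem.Dict.keys, List.mem_map] at hk
  obtain ⟨e, he, rfl⟩ := hk
  simp [len2_not_prefix_single _ (inttxt_keys_len2 e he) c]

-- the one prefix test the scan performs equals the dict-key equality test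
lemma prefix_eq_beq (k : String) (hk : k.toList.length = 2) (c d : Char) (rest : List Char) :
    (k.toList.isPrefixOf (c :: d :: rest)) = (k == String.ofList [c, d]) := by
  obtain ⟨a, b, hl⟩ := List.length_eq_two.mp hk
  have hkk : k = String.ofList [a, b] := by rw [← hl, String.ofList_toList]
  subst hkk
  rw [hl]
  by_cases hac : a = c
  · by_cases hbd : b = d
    · subst hac; subst hbd; simp [List.isPrefixOf]
    · have hne : (String.ofList [a, b] == String.ofList [c, d]) = false := by
        simp only [beq_eq_false_iff_ne]
        intro he
        have := congrArg String.toList he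
        simp at this
        exact hbd this.2
      simp [List.isPrefixOf, hne, hbd]
  · have hne : (String.ofList [a, b] == String.ofList [c, d]) = false := by
      simp only [beq_eq_false_iff_ne]
      intro he
      have := congrArg String.toList he
      simp at this
      exact hac this.1
    simp [List.isPrefixOf, hne, hac]

-- the engine's alternative search over the keys = the dict lookup (over any entry list of 2-char keys)
lemma find?_keys_eq_get? (es : List (String × String)) (c d : Char) (rest : List Char)
    (h2 : ∀ e ∈ es, e.1.toList.length = 2) :
    (es.map Prod.fst).find? (fun k => k.toList.isPrefixOf (c :: d :: rest))
      = ((PySem.Dict.mk es).get? (String.ofList [c, d])).map (fun _ => String.ofList [c, d]) := by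
  induction es with
  | nil => simp [PySem.Dict.get?]
  | cons e t ih =>
    obtain ⟨k, v⟩ := e
    have hk2 : k.toList.length = 2 := h2 (k, v) (by simp)
    rw [List.map_cons, PySem.Dict.get?_mk_cons]
    cases h : (k == String.ofList [c, d]) with
    | false =>
      rw [List.find?_cons_of_neg (by rw [prefix_eq_beq k hk2 c d rest, h]; simp)]
      simp only [Bool.false_eq_true, if_false]
      exact ih (fun e he => h2 e (by simp [he]))
    | true =>
      have hks : k = String.ofList [c, d] := eq_of_beq h
      rw [List.find?_cons_of_pos (by rw [prefix_eq_beq k hk2 c d rest, h])]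
      simp [hks]

lemma skip_step (full : List Char) (a : List Char) (p : Int × Char) :
    inttxtStep full (a, true) p = (a, false) := by
  simp [inttxtStep]

lemma main_fold : ∀ (n : Nat) (l full : List Char) (k : Nat) (a : List Char),
    l.length ≤ n → full.drop k = l →
    ((PySem.List.enumerate l (k : Int)).foldl (inttxtStep full) (a, false)).1
      = a ++ pyReSubLit (PySem.Dict.keys inttxtB)
          (fun s => PySem.Dict.getD inttxtB s "") l := by
  intro n
  induction n with
  | zero =>
    intro l full k a hlen _
    have : l = [] := List.eq_nil_of_length_eq_zero (Nat.le_zero.mp hlen)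
    subst this
    simp [PySem.List.enumerate, pyReSubLit]
  | succ n ih =>
    intro l full k a hlen hd
    match l with
    | [] => simp [PySem.List.enumerate, pyReSubLit]
    | [c] =>
      have hlen1 : (full.drop k).length = 1 := by rw [hd]; rfl
      have hfl : full.length ≤ k + 1 := by
        rw [List.length_drop] at hlen1; omega
      have hget : PySem.List.pyGet? full ((k : Int) + 1) = none := by
        have e : ((k : Int) + 1) = ((k + 1 : Nat) : Int) := by push_cast; ring
        rw [e, PySem.List.pyGet?_natCast]
        exact List.getElem?_eq_none hfl
      simp [PySem.List.enumerate_cons, PySem.List.enumerate_nil, inttxtStep, hget,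
        pyReSubLit, find?_single]
    | c :: d :: rest =>
      have hget : PySem.List.pyGet? full ((k : Int) + 1) = some d := by
        have e : ((k : Int) + 1) = ((k + 1 : Nat) : Int) := by push_cast; ring
        rw [e, PySem.List.pyGet?_natCast]
        have : full[k + 1]? = (full.drop k)[1]? := by
          rw [List.getElem?_drop]
        rw [this, hd]
        rfl
      have hd1 : full.drop (k + 1) = d :: rest := by
        rw [← List.tail_drop, hd]; rfl
      have hd2 : full.drop (k + 2) = rest := by
        rw [← List.tail_drop, hd1]; rfl
      have e1 : ((k : Int) + 1) = ((k + 1 : Nat) : Int) := by push_cast; ring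
      have e2 : ((k : Int) + 1 + 1) = ((k + 2 : Nat) : Int) := by push_cast; ring
      rw [PySem.List.enumerate_cons, List.foldl_cons]
      have hstep : inttxtStep full (a, false) ((k : Int), c) =
          (match PySem.Dict.get? inttxtB (String.ofList [c, d]) with
           | some v => (a ++ v.toList, true)
           | none => (a ++ [c], false)) := by
        simp [inttxtStep, hget]
      have hfind := find?_keys_eq_get? inttxtB.items c d rest inttxt_keys_len2
      cases hb : PySem.Dict.get? inttxtB (String.ofList [c, d]) with
      | some v =>
        rw [hstep, hb]
        rw [PySem.List.enumerate_cons, List.foldl_cons, skip_step, e2]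
        have hlen' : rest.length ≤ n := by
          simp at hlen; omega
        rw [ih rest full (k + 2) (a ++ v.toList) hlen' hd2]
        have hfk : (PySem.Dict.keys inttxtB).find?
            (fun s => s.toList.isPrefixOf (c :: d :: rest)) = some (String.ofList [c, d]) := by
          rw [show PySem.Dict.keys inttxtB = inttxtB.items.map Prod.fst from rfl, hfind, hb]
          rfl
        have hv : PySem.Dict.getD inttxtB (String.ofList [c, d]) "" = v := by
          rw [PySem.Dict.getD_eq_get?_getD, hb]; rfl
        conv_rhs => rw [pyReSubLit]
        rw [hfk]
        simp [hv]
      | none =>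
        rw [hstep, hb, e1]
        have hlen' : (d :: rest).length ≤ n := by
          simp at hlen; simp; omega
        rw [ih (d :: rest) full (k + 1) (a ++ [c]) hlen' hd1]
        have hfk : (PySem.Dict.keys inttxtB).find?
            (fun s => s.toList.isPrefixOf (c :: d :: rest)) = none := by
          rw [show PySem.Dict.keys inttxtB = inttxtB.items.map Prod.fst from rfl, hfind, hb]
          rfl
        conv_rhs => rw [pyReSubLit]
        rw [hfk]
        simp

-- ===== VERDICT (by name: the statement is the Claim_ definition above) =====
theorem inttxt_spec : Claim_equal_inttxt := by
  intro txt _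
  unfold Spec_inttxt inttxt inttxt_alt
  have h0 : txt.toList.drop 0 = txt.toList := rfl
  have := main_fold txt.toList.length txt.toList txt.toList 0 [] (le_refl _) h0
  rw [show ((0 : Nat) : Int) = 0 by simp] at this
  rw [this, List.nil_append]
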